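-- pv_equiv track=rewrite | github.com/momentum-cohort-2019-09/w5-mystery-word-JBHutson | demon_words.py | pareDownWordList
-- ===== SOURCE A (Python) =====
-- def pareDownWordList(words, guess, letters):
--     word_lists = {}
--     open_spaces = []
--     for x in range (len(letters)):
--         if letters[x] == '_':
--             open_spaces.append(x)
--     for word in words:
--         word = word.lower()
--         word_family = ''
--         for x in range(len(word)):
--             if word[x] == guess and x in open_spaces:
--                 if word_family == '':
--                     word_family = str(x)
--                 elif word_family != '':
--                     word_family += '_' + str(x)
--         if word_family != '' and word_lists.get(word_family, None) == None:
--             word_lists[word_family] = []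
--             word_lists[word_family].append(word)
--         elif word_family != '':
--             word_lists[word_family].append(word)
--     largest_family = ''
--     for family in word_lists:
--         if largest_family == '':
--             largest_family = family
--         elif largest_family != '':
--             if len(word_lists[family]) > len(word_lists[largest_family]):
--                 largest_family = family
--     if largest_family == '':
--         return words, largest_family
--     else:
--         return word_lists[largest_family], largest_family
-- ===== SOURCE B (Python) =====
-- def pareDownWordList(words, guess, letters):
--     open_spaces = {x for x in range(len(letters)) if letters[x] == '_'}
--
--     def family_key(word):
--         return '_'.join(str(x) for x in range(len(word))
--                         if word[x] == guess and x in open_spaces)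
--
--     counts = {}
--     for w in words:
--         k = family_key(w.lower())
--         if k:
--             counts[k] = counts.get(k, 0) + 1
--     if not counts:
--         return words, ''
--     winner = max(counts, key=lambda k: counts[k])
--     return [w for w in map(str.lower, words) if family_key(w) == winner], winner
-- ===== Notes on version B (the rewrite author's own statement) =====
-- stated objective: alternative
-- what changed: A accumulates a dict mapping each family key to the list of lowered words and returns the stored list of the first strictly-largest family; B only counts family keys in one pass (no per-family lists), picks the winning key with max(counts, key=...), and re-derives the winning list by filtering the lowered words in a second pass.
import Mathlib
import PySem

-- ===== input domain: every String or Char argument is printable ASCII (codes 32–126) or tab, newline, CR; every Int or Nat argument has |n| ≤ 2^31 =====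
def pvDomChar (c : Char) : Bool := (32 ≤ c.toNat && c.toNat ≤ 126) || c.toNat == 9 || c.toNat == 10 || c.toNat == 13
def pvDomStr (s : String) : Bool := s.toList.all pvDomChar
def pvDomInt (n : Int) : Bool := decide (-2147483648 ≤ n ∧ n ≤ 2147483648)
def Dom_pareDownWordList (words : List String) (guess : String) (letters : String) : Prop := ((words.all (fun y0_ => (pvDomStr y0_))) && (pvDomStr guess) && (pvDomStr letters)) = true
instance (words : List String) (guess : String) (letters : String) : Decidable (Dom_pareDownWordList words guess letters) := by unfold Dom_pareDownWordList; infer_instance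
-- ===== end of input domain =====

-- B replaces A's dict of per-family word lists by a counter of family keys plus a second
-- filtering pass over the words (alternative decomposition; same asymptotic cost).

-- ===== PORT A =====
def pareDownWordList (words : List String) (guess : String) (letters : String) : List String × String :=
  let openSpaces : List Int :=
    (PySem.List.pyRange 0 (PySem.Str.len letters) 1).foldl
      (fun acc x => if PySem.Str.pyGet? letters x == some '_' then acc ++ [x] else acc) []
  let wordLists : PySem.Dict String (List String) :=
    words.foldl (fun d w =>
      let word := PySem.Str.lower w
      let wf := (PySem.List.pyRange 0 (PySem.Str.len word) 1).foldl (fun wf x =>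
          if ((PySem.Str.pyGet? word x).map (fun c => String.ofList [c]) == some guess)
              && decide (x ∈ openSpaces) then
            (if wf = "" then PySem.Int.toStr x else wf ++ "_" ++ PySem.Int.toStr x)
          else wf) ""
      if wf ≠ "" ∧ d.get? wf = none then
        (d.insert wf []).modify wf [] (fun l => l ++ [word])
      else if wf ≠ "" then
        d.modify wf [] (fun l => l ++ [word])
      else d) PySem.Dict.empty
  let largest : String :=
    wordLists.keys.foldl (fun lf fam =>
      if lf = "" then fam
      else if (wordLists.getD fam []).length > (wordLists.getD lf []).length then fam
      else lf) ""
  if largest = "" then (words, largest) else (wordLists.getD largest [], largest)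

-- ===== PORT B =====
-- Source B's helper family_key(word): '_'-joined positions x with word[x] == guess and x in open_spaces
def pvFamilyKey (guess : String) (openSp : PySem.Set Int) (word : String) : String :=
  PySem.Str.join "_"
    (((PySem.List.pyRange 0 (PySem.Str.len word) 1).filter (fun x =>
        ((PySem.Str.pyGet? word x).map (fun c => String.ofList [c]) == some guess)
          && decide (x ∈ openSp))).map PySem.Int.toStr)

def pareDownWordList_alt (words : List String) (guess : String) (letters : String) : List String × String :=
  let openSp : PySem.Set Int :=
    PySem.Set.ofList ((PySem.List.pyRange 0 (PySem.Str.len letters) 1).filter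
      (fun x => PySem.Str.pyGet? letters x == some '_'))
  let counts : PySem.Dict String Int :=
    words.foldl (fun d w =>
      let k := pvFamilyKey guess openSp (PySem.Str.lower w)
      if k ≠ "" then d.insert k (d.getD k 0 + 1) else d) PySem.Dict.empty
  if counts.size = 0 then (words, "")
  else
    let winner := (PySem.List.max? counts.keys (fun k => counts.getD k 0)).getD ""
    ((words.map PySem.Str.lower).filter (fun w => pvFamilyKey guess openSp w == winner), winner)

-- ===== PRECONDITION & SPEC =====
def Spec_pareDownWordList (words : List String) (guess : String) (letters : String) (out : List String × String) : Prop := out = pareDownWordList_alt words guess letters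
instance (words : List String) (guess : String) (letters : String) (out : List String × String) : Decidable (Spec_pareDownWordList words guess letters out) := by unfold Spec_pareDownWordList; infer_instance

-- ===== CLAIM (what is proved, stated in full; the proofs are below) =====
def Claim_equal_pareDownWordList : Prop := ∀ (words : List String) (guess : String) (letters : String), Dom_pareDownWordList words guess letters → Spec_pareDownWordList words guess letters (pareDownWordList words guess letters)

-- ===== LEMMAS AND PROOFS =====

-- proof-side abbreviations
def pvOS (letters : String) : List Int :=
  (PySem.List.pyRange 0 (PySem.Str.len letters) 1).filter
    (fun x => PySem.Str.pyGet? letters x == some '_')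

def pvKEY (guess letters : String) (word : String) : String :=
  pvFamilyKey guess (PySem.Set.ofList (pvOS letters)) word

def pvPairs (guess letters : String) (ws : List String) : List (String × String) :=
  ((ws.map PySem.Str.lower).map (fun w => (pvKEY guess letters w, w))).filter
    (fun p => decide (p.1 ≠ ""))

def pvKs (guess letters : String) (ws : List String) : List String :=
  pvPairs guess letters ws |>.map (fun p => p.1)

def pvDictA (guess letters : String) (ws : List String) : PySem.Dict String (List String) :=
  (pvPairs guess letters ws).foldl (fun d p => d.modify p.1 [] (fun l => l ++ [p.2]))
    PySem.Dict.empty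

def pvDictB (guess letters : String) (ws : List String) : PySem.Dict String Int :=
  (pvKs guess letters ws).foldl (fun d k => d.insert k (d.getD k 0 + 1)) PySem.Dict.empty

-- string/join helpers ------------------------------------------------------

theorem pv_intercalate_singleton {α : Type} (sep : List α) (y : List α) :
    sep.intercalate [y] = y := by
  simp [List.intercalate]

theorem pv_intercalate_cc {α : Type} (sep : List α) (y b : List α) (t : List (List α)) :
    sep.intercalate (y :: b :: t) = sep.intercalate ((y ++ sep ++ b) :: t) := by
  simp [List.intercalate, List.intersperse]
  cases t <;> simp [List.intersperse]

theorem pv_join_cons_foldl (t : List String) (y : String) :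
    PySem.Str.join "_" (y :: t) = t.foldl (fun a s => a ++ "_" ++ s) y := by
  induction t generalizing y with
  | nil => apply String.ext; simp [PySem.Str.join, PySem.Chars.join, pv_intercalate_singleton]
  | cons b t ih =>
    rw [List.foldl_cons, ← ih (y ++ "_" ++ b)]
    apply String.ext
    simp [PySem.Str.join, PySem.Chars.join, pv_intercalate_cc]

theorem pv_str_append_ne_empty (a b : String) (h : b ≠ "") : a ++ b ≠ "" := by
  intro he
  have := congrArg String.toList he
  simp [String.toList_append] at this
  exact h this.2

theorem pv_toStr_ne_empty (n : Int) : PySem.Int.toStr n ≠ "" := by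
  have hc : ∀ (f m : Nat) (l : List Char), l ≠ [] → Nat.toDigitsCore 10 f m l ≠ [] := by
    intro f
    induction f with
    | zero => intro m l h; simpa [Nat.toDigitsCore] using h
    | succ f ih =>
      intro m l h
      simp only [Nat.toDigitsCore]
      split
      · simp
      · exact ih _ _ (by simp)
  have hd : ∀ m : Nat, Nat.toDigits 10 m ≠ [] := by
    intro m
    simp only [Nat.toDigits, Nat.toDigitsCore]
    split
    · simp
    · exact hc _ _ _ (by simp)
  intro h
  have h2 := congrArg String.toList h
  simp [PySem.Int.toStr, PySem.Int.toChars] at h2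
  split at h2
  · simp at h2
  · exact hd _ h2

theorem pv_foldl_key_join (ys : List String) (hy : ∀ s ∈ ys, s ≠ "") :
    ys.foldl (fun wf s => if wf = "" then s else wf ++ "_" ++ s) ""
      = PySem.Str.join "_" ys := by
  cases ys with
  | nil => rfl
  | cons y t =>
    rw [List.foldl_cons]
    rw [pv_join_cons_foldl]
    have key : ∀ (t' : List String) (acc : String), acc ≠ "" → (∀ s ∈ t', s ≠ "") →
        t'.foldl (fun wf s => if wf = "" then s else wf ++ "_" ++ s) acc
          = t'.foldl (fun a s => a ++ "_" ++ s) acc := by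
      intro t'
      induction t' with
      | nil => intro acc h _; rfl
      | cons b tt ih =>
        intro acc hacc hall
        rw [List.foldl_cons, List.foldl_cons, if_neg hacc]
        exact ih _ (pv_str_append_ne_empty _ _ (hall b (by simp)))
          (fun s hs => hall s (by simp [hs]))
    exact key t y (hy y (by simp)) (fun s hs => hy s (by simp [hs]))

-- A's string-building loop over positions computes the '_'-join of the selected positions.
theorem pv_keyA_eq (q : Int → Bool) (xs : List Int) :
    xs.foldl (fun wf x => if q x then
        (if wf = "" then PySem.Int.toStr x else wf ++ "_" ++ PySem.Int.toStr x) else wf) ""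
      = PySem.Str.join "_" ((xs.filter q).map PySem.Int.toStr) := by
  rw [← pv_foldl_key_join ((xs.filter q).map PySem.Int.toStr) (by
    intro s hs
    simp only [List.mem_map] at hs
    obtain ⟨x, _, hx⟩ := hs
    exact hx ▸ pv_toStr_ne_empty x)]
  rw [List.foldl_map, List.foldl_filter]

-- membership in a list and in the set built from it give the same Bool
theorem pv_decide_mem_ofList (l : List Int) (x : Int) :
    decide (x ∈ l) = decide (x ∈ PySem.Set.ofList l) :=
  decide_eq_decide.mpr (PySem.Set.mem_ofList l x).symm

theorem pv_keyfold_eq (guess letters word : String) :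
    (PySem.List.pyRange 0 (PySem.Str.len word) 1).foldl (fun wf x =>
        if ((PySem.Str.pyGet? word x).map (fun c => String.ofList [c]) == some guess)
            && decide (x ∈ pvOS letters) then
          (if wf = "" then PySem.Int.toStr x else wf ++ "_" ++ PySem.Int.toStr x)
        else wf) ""
      = pvKEY guess letters word := by
  rw [pv_keyA_eq]
  unfold pvKEY pvFamilyKey
  have h : (fun x : Int =>
      ((PySem.Str.pyGet? word x).map (fun c => String.ofList [c]) == some guess)
        && decide (x ∈ pvOS letters))
      = (fun x : Int =>
      ((PySem.Str.pyGet? word x).map (fun c => String.ofList [c]) == some guess)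
        && decide (x ∈ PySem.Set.ofList (pvOS letters))) := by
    funext x
    rw [pv_decide_mem_ofList]
  rw [h]

-- A's two dict-update branches are one `modify`.
theorem pv_modify_insert_none {κ : Type} [BEq κ] [LawfulBEq κ] {ν : Type}
    (d : PySem.Dict κ ν) (k : κ) (dflt : ν) (f : ν → ν) (h : d.get? k = none) :
    (d.insert k dflt).modify k dflt f = d.modify k dflt f := by
  simp [PySem.Dict.modify, PySem.Dict.getD_eq_get?_getD, h, PySem.Dict.get?_insert_self,
    PySem.Dict.insert_insert_self]

theorem pv_stepA_collapse (d : PySem.Dict String (List String)) (wf : String) (word : String) :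
    (if wf ≠ "" ∧ d.get? wf = none then
        (d.insert wf []).modify wf [] (fun l => l ++ [word])
      else if wf ≠ "" then d.modify wf [] (fun l => l ++ [word]) else d)
      = (if wf ≠ "" then d.modify wf [] (fun l => l ++ [word]) else d) := by
  by_cases h1 : wf = ""
  · simp [h1]
  · by_cases h2 : d.get? wf = none
    · simp [h1, h2, pv_modify_insert_none]
    · simp [h1, h2]

-- A's grouping loop over the words, rephrased as a fold over the (key, word) pairs
theorem pv_foldA_pairs (guess letters : String) (ws : List String) :
    ws.foldl (fun d w =>
        if pvKEY guess letters (PySem.Str.lower w) ≠ "" then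
          d.modify (pvKEY guess letters (PySem.Str.lower w)) []
            (fun l => l ++ [PySem.Str.lower w])
        else d) PySem.Dict.empty
      = pvDictA guess letters ws := by
  unfold pvDictA pvPairs
  rw [List.foldl_filter, List.foldl_map, List.foldl_map]
  refine List.foldl_ext _ _ _ ?_
  intro d w _
  by_cases h : pvKEY guess letters (PySem.Str.lower w) = "" <;> simp [h]

-- B's counting loop over the words, rephrased as a fold over the key list
theorem pv_foldB_ks (guess letters : String) (ws : List String) :
    ws.foldl (fun d w =>
        if pvKEY guess letters (PySem.Str.lower w) ≠ "" then
          d.insert (pvKEY guess letters (PySem.Str.lower w))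
            (d.getD (pvKEY guess letters (PySem.Str.lower w)) 0 + 1)
        else d) PySem.Dict.empty
      = pvDictB guess letters ws := by
  unfold pvDictB pvKs pvPairs
  rw [List.foldl_map, List.foldl_filter, List.foldl_map, List.foldl_map]
  refine List.foldl_ext _ _ _ ?_
  intro d w _
  by_cases h : pvKEY guess letters (PySem.Str.lower w) = "" <;> simp [h]

-- Python max(xs, key) = first-strict-max fold with "" as the "unset" sentinel
def pvMaxStep (f : String → Int) : Option String → String → Option String :=
  fun acc x => match acc with
    | none => some x
    | some m => if f m < f x then some x else some m

theorem pv_max?_eq_foldl (xs : List String) (f : String → Int) :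
    PySem.List.max? xs f = xs.foldl (pvMaxStep f) none := by
  simp only [PySem.List.max?]
  refine List.foldl_ext _ _ _ ?_
  intro a b _
  cases a <;> rfl

theorem pv_max_fold_eq (K : List String) (gA : String → Nat) (f : String → Int)
    (hne : ∀ k ∈ K, k ≠ "") (hgf : ∀ k ∈ K, (gA k : Int) = f k) :
    K.foldl (fun lf fam => if lf = "" then fam
        else if gA fam > gA lf then fam else lf) ""
      = (PySem.List.max? K f).getD "" := by
  cases K with
  | nil => rfl
  | cons k t =>
    rw [List.foldl_cons]
    rw [pv_max?_eq_foldl, List.foldl_cons]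
    have key : ∀ (t' : List String) (acc : String), acc ≠ "" → ((gA acc : Int) = f acc) →
        (∀ s ∈ t', s ≠ "") → (∀ s ∈ t', (gA s : Int) = f s) →
        t'.foldl (fun lf fam => if lf = "" then fam
            else if gA fam > gA lf then fam else lf) acc
          = (t'.foldl (pvMaxStep f) (some acc)).getD "" := by
      intro t'
      induction t' with
      | nil => intro acc h _ _ _; rfl
      | cons b tt ih =>
        intro acc hacc hacceq hall halleq
        rw [List.foldl_cons, List.foldl_cons, if_neg hacc]
        simp only [pvMaxStep]
        have hb := hall b (by simp)
        have hbeq := halleq b (by simp)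
        have hrest1 : ∀ s ∈ tt, s ≠ "" := fun s hs => hall s (by simp [hs])
        have hrest2 : ∀ s ∈ tt, (gA s : Int) = f s := fun s hs => halleq s (by simp [hs])
        by_cases hlt : gA b > gA acc
        · have hf : f acc < f b := by rw [← hacceq, ← hbeq]; exact_mod_cast hlt
          rw [if_pos hlt, if_pos hf]
          exact ih b hb hbeq hrest1 hrest2
        · have hf : ¬ f acc < f b := by rw [← hacceq, ← hbeq]; exact_mod_cast hlt
          rw [if_neg hlt, if_neg hf]
          exact ih acc hacc hacceq hrest1 hrest2
    simp only [if_true]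
    exact key t k (hne k (by simp)) (hgf k (by simp))
      (fun s hs => hne s (by simp [hs])) (fun s hs => hgf s (by simp [hs]))

-- facts about the canonical dicts ------------------------------------------

theorem pv_keysA_eq_keysB (guess letters : String) (ws : List String) :
    (pvDictA guess letters ws).keys = (pvDictB guess letters ws).keys := by
  unfold pvDictA pvDictB
  rw [PySem.Dict.keys_foldl_modify_key (pvPairs guess letters ws) Prod.fst []
    (fun _ p => fun l => l ++ [p.2]) PySem.Dict.empty]
  rw [PySem.Dict.keys_foldl_insert (pvKs guess letters ws)
    (fun d k => d.getD k 0 + 1) PySem.Dict.empty]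
  rfl

theorem pv_mem_keysB (guess letters : String) (ws : List String) (k : String)
    (h : k ∈ (pvDictB guess letters ws).keys) : k ∈ pvKs guess letters ws := by
  unfold pvDictB at h
  rw [PySem.Dict.keys_foldl_insert (pvKs guess letters ws)
    (fun d k => d.getD k 0 + 1) PySem.Dict.empty] at h
  have : PySem.Set.update (PySem.Dict.empty (κ := String) (ν := Int)).keys
      (pvKs guess letters ws) = PySem.Set.ofList (pvKs guess letters ws) := rfl
  rw [this, PySem.Set.mem_ofList] at h
  exact h

theorem pv_mem_ks_ne (guess letters : String) (ws : List String) (k : String)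
    (h : k ∈ pvKs guess letters ws) : k ≠ "" := by
  unfold pvKs pvPairs at h
  simp only [List.mem_map, List.mem_filter] at h
  obtain ⟨p, ⟨_, hp⟩, hk⟩ := h
  subst hk
  simpa using hp

theorem pv_getA (guess letters : String) (ws : List String) (k : String) :
    (pvDictA guess letters ws).getD k []
      = ((pvPairs guess letters ws).filter (fun p => p.1 == k)).map (fun p => p.2) := by
  unfold pvDictA
  rw [PySem.Dict.getD_foldl_modify_append]
  simp [PySem.Dict.getD_empty]

theorem pv_getB (guess letters : String) (ws : List String) (k : String) :
    (pvDictB guess letters ws).getD k 0 = ((pvKs guess letters ws).count k : Int) := by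
  unfold pvDictB
  rw [PySem.Dict.getD_foldl_insert_add_one]
  simp [PySem.Dict.getD_empty]

theorem pv_len_eq_count (guess letters : String) (ws : List String) (k : String) :
    ((((pvPairs guess letters ws).filter (fun p => p.1 == k)).map (fun p => p.2)).length : Int)
      = (pvDictB guess letters ws).getD k 0 := by
  rw [pv_getB]
  congr 1
  rw [List.length_map]
  unfold pvKs
  simp [List.count, List.countP_map, ← List.countP_eq_length_filter]
  rfl

-- final-value translation for a nonempty winner
theorem pv_value_eq (guess letters : String) (ws : List String) (L : String) (hL : L ≠ "") :
    ((pvPairs guess letters ws).filter (fun p => p.1 == L)).map (fun p => p.2)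
      = (ws.map PySem.Str.lower).filter (fun w => pvKEY guess letters w == L) := by
  unfold pvPairs
  rw [List.filter_filter]
  have hpred : ∀ a : String × String,
      ((a.1 == L) && decide (a.1 ≠ "")) = (a.1 == L) := by
    intro a
    by_cases h : a.1 = L
    · subst h; simp [hL]
    · simp [h]
  simp only [hpred]
  rw [List.filter_map, List.map_map]
  simp only [Function.comp_def, List.map_id_fun', id]

-- the two ports in canonical form ------------------------------------------

set_option maxHeartbeats 1000000 in
theorem pv_portA_canon (ws : List String) (guess letters : String) :
    pareDownWordList ws guess letters =
      (if (pvDictA guess letters ws).keys.foldl (fun lf fam =>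
          if lf = "" then fam
          else if ((pvDictA guess letters ws).getD fam []).length
              > ((pvDictA guess letters ws).getD lf []).length then fam
          else lf) "" = ""
       then (ws, (pvDictA guess letters ws).keys.foldl (fun lf fam =>
          if lf = "" then fam
          else if ((pvDictA guess letters ws).getD fam []).length
              > ((pvDictA guess letters ws).getD lf []).length then fam
          else lf) "")
       else ((pvDictA guess letters ws).getD ((pvDictA guess letters ws).keys.foldl (fun lf fam =>
          if lf = "" then fam
          else if ((pvDictA guess letters ws).getD fam []).length
              > ((pvDictA guess letters ws).getD lf []).length then fam
          else lf) "") [], (pvDictA guess letters ws).keys.foldl (fun lf fam =>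
          if lf = "" then fam
          else if ((pvDictA guess letters ws).getD fam []).length
              > ((pvDictA guess letters ws).getD lf []).length then fam
          else lf) "")) := by
  simp only [pareDownWordList]
  have hOS : ((PySem.List.pyRange 0 (PySem.Str.len letters) 1).foldl
      (fun acc x => if PySem.Str.pyGet? letters x == some '_' then acc ++ [x] else acc)
      ([] : List Int)) = pvOS letters := by
    simpa [pvOS] using PySem.List.foldl_append_if
      (fun x => PySem.Str.pyGet? letters x == some '_') id
      (PySem.List.pyRange 0 (PySem.Str.len letters) 1) []
  rw [hOS]
  simp only [pv_keyfold_eq]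
  have hfold : ws.foldl (fun (d : PySem.Dict String (List String)) (w : String) =>
      if pvKEY guess letters (PySem.Str.lower w) ≠ "" ∧
          d.get? (pvKEY guess letters (PySem.Str.lower w)) = none then
        (d.insert (pvKEY guess letters (PySem.Str.lower w)) []).modify
          (pvKEY guess letters (PySem.Str.lower w)) [] (fun l => l ++ [PySem.Str.lower w])
      else if pvKEY guess letters (PySem.Str.lower w) ≠ "" then
        d.modify (pvKEY guess letters (PySem.Str.lower w)) [] (fun l => l ++ [PySem.Str.lower w])
      else d) PySem.Dict.empty = pvDictA guess letters ws := by
    have hbody : (fun (d : PySem.Dict String (List String)) (w : String) =>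
        if pvKEY guess letters (PySem.Str.lower w) ≠ "" ∧
            d.get? (pvKEY guess letters (PySem.Str.lower w)) = none then
          (d.insert (pvKEY guess letters (PySem.Str.lower w)) []).modify
            (pvKEY guess letters (PySem.Str.lower w)) [] (fun l => l ++ [PySem.Str.lower w])
        else if pvKEY guess letters (PySem.Str.lower w) ≠ "" then
          d.modify (pvKEY guess letters (PySem.Str.lower w)) [] (fun l => l ++ [PySem.Str.lower w])
        else d)
        = (fun (d : PySem.Dict String (List String)) (w : String) =>
        if pvKEY guess letters (PySem.Str.lower w) ≠ "" then
          d.modify (pvKEY guess letters (PySem.Str.lower w)) []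
            (fun l => l ++ [PySem.Str.lower w])
        else d) := by
      funext d w
      exact pv_stepA_collapse d (pvKEY guess letters (PySem.Str.lower w)) (PySem.Str.lower w)
    rw [hbody]
    exact pv_foldA_pairs guess letters ws
  rw [hfold]

theorem pv_portB_canon (ws : List String) (guess letters : String) :
    pareDownWordList_alt ws guess letters =
      (if (pvDictB guess letters ws).size = 0 then (ws, "")
       else
         ((ws.map PySem.Str.lower).filter (fun w => pvKEY guess letters w ==
            (PySem.List.max? (pvDictB guess letters ws).keys
              (fun k => (pvDictB guess letters ws).getD k 0)).getD ""),
          (PySem.List.max? (pvDictB guess letters ws).keys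
            (fun k => (pvDictB guess letters ws).getD k 0)).getD "")) := by
  simp only [pareDownWordList_alt]
  have hfold : ws.foldl (fun (d : PySem.Dict String Int) (w : String) =>
      if pvFamilyKey guess (PySem.Set.ofList ((PySem.List.pyRange 0 (PySem.Str.len letters) 1).filter
            (fun x => PySem.Str.pyGet? letters x == some '_'))) (PySem.Str.lower w) ≠ "" then
        d.insert (pvFamilyKey guess (PySem.Set.ofList ((PySem.List.pyRange 0 (PySem.Str.len letters) 1).filter
            (fun x => PySem.Str.pyGet? letters x == some '_'))) (PySem.Str.lower w))
          (d.getD (pvFamilyKey guess (PySem.Set.ofList ((PySem.List.pyRange 0 (PySem.Str.len letters) 1).filter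
            (fun x => PySem.Str.pyGet? letters x == some '_'))) (PySem.Str.lower w)) 0 + 1)
      else d) PySem.Dict.empty = pvDictB guess letters ws := pv_foldB_ks guess letters ws
  rw [hfold]
  simp only [pvKEY, pvOS]

-- sizes and keys ------------------------------------------------------------

theorem pv_sizeB_zero_iff {κ ν : Type} [BEq κ] (d : PySem.Dict κ ν) :
    d.size = 0 ↔ d.keys = [] := by
  cases d with
  | mk items => simp [PySem.Dict.size, PySem.Dict.keys]

-- main equality --------------------------------------------------------------

theorem pv_main (ws : List String) (guess letters : String) :
    pareDownWordList ws guess letters = pareDownWordList_alt ws guess letters := by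
  rw [pv_portA_canon, pv_portB_canon]
  have hkeys := pv_keysA_eq_keysB guess letters ws
  have hne : ∀ k ∈ (pvDictB guess letters ws).keys, k ≠ "" := fun k hk =>
    pv_mem_ks_ne guess letters ws k (pv_mem_keysB guess letters ws k hk)
  have hgf : ∀ k ∈ (pvDictB guess letters ws).keys,
      (((pvDictA guess letters ws).getD k []).length : Int)
        = (pvDictB guess letters ws).getD k 0 := by
    intro k _
    rw [pv_getA]
    exact pv_len_eq_count guess letters ws k
  have hmax : (pvDictA guess letters ws).keys.foldl (fun lf fam =>
      if lf = "" then fam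
      else if ((pvDictA guess letters ws).getD fam []).length
          > ((pvDictA guess letters ws).getD lf []).length then fam
      else lf) ""
      = (PySem.List.max? (pvDictB guess letters ws).keys
          (fun k => (pvDictB guess letters ws).getD k 0)).getD "" := by
    rw [hkeys]
    exact pv_max_fold_eq (pvDictB guess letters ws).keys
      (fun fam => ((pvDictA guess letters ws).getD fam []).length)
      (fun k => (pvDictB guess letters ws).getD k 0) hne hgf
  rw [hmax]
  by_cases hK : (pvDictB guess letters ws).keys = []
  · have hsz : (pvDictB guess letters ws).size = 0 := (pv_sizeB_zero_iff _).mpr hK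
    rw [hK]
    simp [hsz, PySem.List.max?]
  · have hsz : ¬ (pvDictB guess letters ws).size = 0 := by
      intro h
      exact hK ((pv_sizeB_zero_iff _).mp h)
    obtain ⟨m, hm⟩ : ∃ m, PySem.List.max? (pvDictB guess letters ws).keys
        (fun k => (pvDictB guess letters ws).getD k 0) = some m := by
      cases hmx : PySem.List.max? (pvDictB guess letters ws).keys
          (fun k => (pvDictB guess letters ws).getD k 0) with
      | none => exact absurd ((PySem.List.max?_eq_none_iff _ _).mp hmx) hK
      | some m => exact ⟨m, rfl⟩
    have hmK : m ∈ (pvDictB guess letters ws).keys := PySem.List.max?_mem hm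
    have hmne : m ≠ "" := hne m hmK
    rw [hm]
    simp only [Option.getD_some]
    rw [if_neg hmne, if_neg hsz]
    refine Prod.ext ?_ rfl
    simp only []
    rw [pv_getA, pv_value_eq guess letters ws m hmne]

-- ===== VERDICT (by name: the statement is the Claim_ definition above) =====
theorem pareDownWordList_spec : Claim_equal_pareDownWordList := by
  intro words guess letters _
  unfold Spec_pareDownWordList
  exact pv_main words guess letters
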